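-- pv_equiv track=rewrite | github.com/marbeau17/auction | app/middleware/rbac.py | filter_response_fields
-- ===== SOURCE A (Python) =====
-- import copy
--
-- _SENSITIVE_FIELDS: dict[str, dict[str, list[str]]] = {
--     "simulations": {
--         "investor": [
--             "result.lease.fee_breakdown",
--             "result.acquisition.safety_margin_applied",
--         ],
--         "end_user": [
--             "result.lease.fee_breakdown",
--             "result.acquisition.safety_margin_applied",
--             "result.residual",
--         ],
--     },
-- }
--
-- def get_user_role(user: dict) -> str:
--     """Extract the effective role from user dict.
--
--     Checks stakeholder_role first, falls back to role.
--     """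
--     return user.get("stakeholder_role") or user.get("role", "viewer")
--
-- def filter_response_fields(data: dict, resource: str, user: dict) -> dict:
--     """Filter sensitive fields from response based on user's role.
--
--     For example, pricing logic details should not be visible to investors.
--     Nested field paths use dot notation (e.g. ``result.lease.fee_breakdown``).
--     """
--     role = get_user_role(user)
--
--     hidden_fields = _SENSITIVE_FIELDS.get(resource, {}).get(role, [])
--     if not hidden_fields:
--         return data
--
--     # Deep copy so callers keep the original intact
--     filtered = copy.deepcopy(data)
--     for field_path in hidden_fields:
--         parts = field_path.split(".")
--         obj = filtered
--         for part in parts[:-1]: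
--             if isinstance(obj, dict) and part in obj:
--                 obj = obj[part]
--             else:
--                 break
--         else:
--             if isinstance(obj, dict):
--                 obj.pop(parts[-1], None)
--
--     return filtered
-- ===== SOURCE B (Python) =====
-- _SENSITIVE_FIELDS: dict[str, dict[str, list[str]]] = {
--     "simulations": {
--         "investor": [
--             "result.lease.fee_breakdown",
--             "result.acquisition.safety_margin_applied",
--         ],
--         "end_user": [
--             "result.lease.fee_breakdown",
--             "result.acquisition.safety_margin_applied",
--             "result.residual",
--         ],
--     },
-- }
--
-- def get_user_role(user: dict) -> str:
--     return user.get("stakeholder_role") or user.get("role", "viewer")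
--
-- def filter_response_fields(data: dict, resource: str, user: dict) -> dict:
--     """Filter sensitive fields from response based on user's role.
--
--     One-pass rebuild: collect the hidden paths as a set of tuples and
--     reconstruct the nested dict, dropping every key whose full path is hidden.
--     """
--     role = get_user_role(user)
--     hidden_fields = _SENSITIVE_FIELDS.get(resource, {}).get(role, [])
--     if not hidden_fields:
--         return data
--
--     paths = {tuple(f.split(".")) for f in hidden_fields}
--
--     def prune(obj, prefix):
--         if not isinstance(obj, dict):
--             return obj
--         return {k: prune(v, prefix + (k,))
--                 for k, v in obj.items()
--                 if prefix + (k,) not in paths}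
--
--     return prune(data, ())
-- ===== Notes on version B (the rewrite author's own statement) =====
-- stated objective: alternative
-- what changed: Instead of deep-copying the response and then navigating and popping each dotted field path one by one, B collects the hidden paths into a set of tuples and rebuilds the nested dict in a single recursive pass, dropping every key whose full path is hidden.
import Mathlib
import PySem

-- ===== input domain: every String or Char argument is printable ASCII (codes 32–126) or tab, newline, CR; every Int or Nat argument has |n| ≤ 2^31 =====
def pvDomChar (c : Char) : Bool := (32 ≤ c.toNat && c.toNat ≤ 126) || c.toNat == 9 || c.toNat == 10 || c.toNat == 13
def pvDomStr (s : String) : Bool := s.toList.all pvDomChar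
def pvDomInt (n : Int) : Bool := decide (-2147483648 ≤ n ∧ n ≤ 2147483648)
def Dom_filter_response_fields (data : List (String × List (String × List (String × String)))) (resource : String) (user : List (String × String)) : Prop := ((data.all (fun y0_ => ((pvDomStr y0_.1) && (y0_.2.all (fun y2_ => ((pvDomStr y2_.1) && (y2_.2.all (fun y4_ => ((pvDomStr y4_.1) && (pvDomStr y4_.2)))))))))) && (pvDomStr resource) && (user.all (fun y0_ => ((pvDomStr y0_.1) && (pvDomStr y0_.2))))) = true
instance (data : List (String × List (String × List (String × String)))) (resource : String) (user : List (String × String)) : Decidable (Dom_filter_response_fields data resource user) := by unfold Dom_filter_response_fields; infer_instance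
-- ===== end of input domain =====

-- B rebuilds the response in ONE recursive pass over the nested dict, dropping keys whose
-- full dotted path is hidden, instead of A's deepcopy followed by a per-path navigate-and-pop walk.
-- The equivalence is about the RETURN value only (A deep-copies; neither mutates its arguments).

-- ===== PORT A =====
-- shared module context: get_user_role and the _SENSITIVE_FIELDS constant lookup
-- user.get(k) as first-match lookup on the association list
def pyGetUser (user : List (String × String)) (k : String) : Option String :=
  (user.find? (fun p => p.1 == k)).map (·.2)

-- get_user_role: user.get("stakeholder_role") or user.get("role", "viewer")
-- ('or' falls through on None AND on the empty string, both falsy)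
def get_user_role_port (user : List (String × String)) : String :=
  match pyGetUser user "stakeholder_role" with
  | some s => if s = "" then (pyGetUser user "role").getD "viewer" else s
  | none => (pyGetUser user "role").getD "viewer"

-- _SENSITIVE_FIELDS.get(resource, {}).get(role, []) on the literal module constant
def pyHiddenFields (resource role : String) : List String :=
  if resource = "simulations" then
    if role = "investor" then
      ["result.lease.fee_breakdown", "result.acquisition.safety_margin_applied"]
    else if role = "end_user" then
      ["result.lease.fee_breakdown", "result.acquisition.safety_margin_applied", "result.residual"]
    else []
  else []

-- obj.pop(k, None): remove the entry for k (dict keys are unique; first match)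
def popKey {α : Type} (d : List (String × α)) (k : String) : List (String × α) :=
  d.eraseP (fun p => p.1 == k)

-- in-place mutation of obj = d[k]: rewrite the entry for k through f ('part in obj' check included:
-- when k is absent nothing happens, = Python's break with no pop)
def updateFirst {α : Type} : List (String × α) → String → (α → α) → List (String × α)
  | [], _, _ => []
  | p :: rest, k, f => if p.1 = k then (p.1, f p.2) :: rest else p :: updateFirst rest k f

-- A's inner loop for one field_path, on the 3-level structure the type fixes.
-- Paths of other lengths (unreachable from the module constant) leave data unchanged,
-- exactly as A's for/else-break does when navigation leaves the nested dicts.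
-- f.split("."): sep "." is nonempty, so Python's split always returns (split? is some)
def pySplitDot (f : String) : List String := (PySem.Str.split? f ".").getD []

def removePath (d : List (String × List (String × List (String × String)))) :
    List String → List (String × List (String × List (String × String)))
  | [k] => popKey d k
  | [k1, k] => updateFirst d k1 (fun v => popKey v k)
  | [k1, k2, k] => updateFirst d k1 (fun v => updateFirst v k2 (fun w => popKey w k))
  | _ => d

def filter_response_fields (data : List (String × List (String × List (String × String)))) (resource : String) (user : List (String × String)) : List (String × List (String × List (String × String))) :=
  let role := get_user_role_port user
  let hidden := pyHiddenFields resource role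
  if hidden.isEmpty then data
  else hidden.foldl (fun acc fp => removePath acc (pySplitDot fp)) data

-- ===== PORT B =====
-- prune(obj, prefix) from Source B, unrolled to the 3 dict levels the type fixes
-- (at the innermost level the values are strings, so prune returns them unchanged).
def pruneL3 (paths : PySem.Set (List String)) (pre : List String) (obj : List (String × String)) : List (String × String) :=
  obj.filter (fun r => !(PySem.Set.contains paths (pre ++ [r.1])))

def pruneL2 (paths : PySem.Set (List String)) (pre : List String) (obj : List (String × List (String × String))) : List (String × List (String × String)) :=
  (obj.filter (fun q => !(PySem.Set.contains paths (pre ++ [q.1])))).map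
    (fun q => (q.1, pruneL3 paths (pre ++ [q.1]) q.2))

def pruneL1 (paths : PySem.Set (List String)) (obj : List (String × List (String × List (String × String)))) : List (String × List (String × List (String × String))) :=
  (obj.filter (fun p => !(PySem.Set.contains paths [p.1]))).map
    (fun p => (p.1, pruneL2 paths [p.1] p.2))

def filter_response_fields_alt (data : List (String × List (String × List (String × String)))) (resource : String) (user : List (String × String)) : List (String × List (String × List (String × String))) :=
  let role := get_user_role_port user
  let hidden := pyHiddenFields resource role
  if hidden.isEmpty then data
  else
    let paths : PySem.Set (List String) :=
      PySem.Set.ofList (hidden.map (fun f => pySplitDot f))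
    pruneL1 paths data

-- ===== PRECONDITION & SPEC =====
abbrev NodupKeys {α : Type} (l : List (String × α)) : Prop := (l.map Prod.fst).Nodup

-- Pre_ excludes association lists with duplicate keys at some dict level: those do not
-- represent a Python dict (Python collapses duplicates before the function ever runs),
-- so which occurrence the ports touch there is nobody's specified behaviour.
def Pre_filter_response_fields (data : List (String × List (String × List (String × String)))) (resource : String) (user : List (String × String)) : Prop :=
  NodupKeys data ∧ ∀ p ∈ data, NodupKeys p.2 ∧ ∀ q ∈ p.2, NodupKeys q.2

instance (data : List (String × List (String × List (String × String)))) (resource : String) (user : List (String × String)) : Decidable (Pre_filter_response_fields data resource user) := by unfold Pre_filter_response_fields; infer_instance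

def pvWitness_filter_response_fields : (List (String × List (String × List (String × String)))) × String × (List (String × String)) :=
  ([("result", [("lease", [("fee_breakdown", "120"), ("rate", "3")]), ("acquisition", [("safety_margin_applied", "yes")])]), ("meta", [])],
   "simulations",
   [("role", "investor")])

def Spec_filter_response_fields (data : List (String × List (String × List (String × String)))) (resource : String) (user : List (String × String)) (out : List (String × List (String × List (String × String)))) : Prop := out = filter_response_fields_alt data resource user
instance (data : List (String × List (String × List (String × String)))) (resource : String) (user : List (String × String)) (out : List (String × List (String × List (String × String)))) : Decidable (Spec_filter_response_fields data resource user out) := by unfold Spec_filter_response_fields; infer_instance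

-- ===== CLAIM (what is proved, stated in full; the proofs are below) =====
def Claim_equal_filter_response_fields : Prop := ∀ (data : List (String × List (String × List (String × String)))) (resource : String) (user : List (String × String)), Dom_filter_response_fields data resource user → Pre_filter_response_fields data resource user → Spec_filter_response_fields data resource user (filter_response_fields data resource user)

-- ===== LEMMAS AND PROOFS =====

-- updateFirst twice at the same key composes the two rewrites
theorem updateFirst_updateFirst {α : Type} (l : List (String × α)) (k : String) (f g : α → α) :
    updateFirst (updateFirst l k f) k g = updateFirst l k (fun v => g (f v)) := by
  induction l with
  | nil => rfl
  | cons p rest ih =>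
    by_cases h : p.1 = k <;> simp [updateFirst, h, ih]

-- under unique keys, rewriting the (single) entry for k is a map
theorem updateFirst_eq_map {α : Type} (l : List (String × α)) (k : String) (f : α → α)
    (h : NodupKeys l) :
    updateFirst l k f = l.map (fun p => if p.1 = k then (p.1, f p.2) else p) := by
  induction l with
  | nil => rfl
  | cons p rest ih =>
    simp only [NodupKeys, List.map_cons, List.nodup_cons] at h
    by_cases hk : p.1 = k
    · subst hk
      have hid : ∀ q ∈ rest, (if q.1 = p.1 then (q.1, f q.2) else q) = q := by
        intro q hq
        have : q.1 ≠ p.1 := fun e => h.1 (e ▸ List.mem_map_of_mem hq)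
        simp [this]
      have hrest : rest.map (fun q => if q.1 = p.1 then (q.1, f q.2) else q) = rest :=
        (List.map_congr_left hid).trans (List.map_id rest)
      simp [updateFirst, hrest]
    · simp [updateFirst, hk, ih h.2]

-- under unique keys, pop(k, None) (erase of the first match) is a filter
theorem popKey_eq_filter {α : Type} (l : List (String × α)) (k : String)
    (h : NodupKeys l) :
    popKey l k = l.filter (fun p => !(p.1 == k)) := by
  induction l with
  | nil => rfl
  | cons p rest ih =>
    simp only [NodupKeys, List.map_cons, List.nodup_cons] at h
    by_cases hk : p.1 = k
    · subst hk
      have hall : ∀ q ∈ rest, (!(q.1 == p.1)) = true := by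
        intro q hq
        have : q.1 ≠ p.1 := fun e => h.1 (e ▸ List.mem_map_of_mem hq)
        simpa using this
      simp [popKey, List.filter_eq_self.mpr hall]
    · simpa [popKey, List.eraseP_cons, hk, List.filter_cons] using ih h.2

-- the entry-rewrite map keeps the key list
theorem keys_map_update {α : Type} (l : List (String × α)) (k : String) (f : α → α) :
    (l.map (fun q => if q.1 = k then (q.1, f q.2) else q)).map Prod.fst = l.map Prod.fst := by
  rw [List.map_map]
  apply List.map_congr_left
  intro q _
  by_cases h : q.1 = k <;> simp [h]

theorem nodup_map_update {α : Type} (l : List (String × α)) (k : String) (f : α → α)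
    (h : NodupKeys l) :
    NodupKeys (l.map (fun q => if q.1 = k then (q.1, f q.2) else q)) := by
  unfold NodupKeys
  rw [keys_map_update]
  exact h

-- the two branch lemmas: A's per-path walks equal B's one-pass prune
theorem investor_case (d : List (String × List (String × List (String × String))))
    (hPre : Pre_filter_response_fields d "simulations" []) :
    removePath (removePath d ["result", "lease", "fee_breakdown"])
        ["result", "acquisition", "safety_margin_applied"]
      = pruneL1 [["result", "lease", "fee_breakdown"],
                 ["result", "acquisition", "safety_margin_applied"]] d := by
  obtain ⟨hTop, hInner⟩ := hPre
  show updateFirst (updateFirst d "result"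
      (fun v => updateFirst v "lease" (fun w => popKey w "fee_breakdown"))) "result"
      (fun v => updateFirst v "acquisition" (fun w => popKey w "safety_margin_applied"))
    = _
  rw [updateFirst_updateFirst, updateFirst_eq_map _ _ _ hTop]
  unfold pruneL1
  rw [List.filter_eq_self.mpr (by intro p _; simp [PySem.Set.contains])]
  apply List.map_congr_left
  intro p hp
  obtain ⟨hN2, hN3⟩ := hInner p hp
  by_cases hk : p.1 = "result"
  · rw [if_pos hk]
    congr 1
    have hN2' : NodupKeys (p.2.map
        (fun q => if q.1 = "lease" then (q.1, popKey q.2 "fee_breakdown") else q)) :=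
      nodup_map_update _ _ _ hN2
    rw [updateFirst_eq_map _ _ _ hN2, updateFirst_eq_map _ _ _ hN2', List.map_map]
    unfold pruneL2
    rw [List.filter_eq_self.mpr (by intro q _; simp [PySem.Set.contains])]
    apply List.map_congr_left
    intro q hq
    have hN3q := hN3 q hq
    unfold pruneL3
    by_cases h1 : q.1 = "lease"
    · rw [List.filter_congr (l := q.2)
        (q := fun r => !(r.1 == "fee_breakdown"))
        (by intro r _; simp [PySem.Set.contains, hk, h1, beq_eq_decide]),
        ← popKey_eq_filter _ _ hN3q]
      simp [Function.comp, h1]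
    · by_cases h2 : q.1 = "acquisition"
      · rw [List.filter_congr (l := q.2)
          (q := fun r => !(r.1 == "safety_margin_applied"))
          (by intro r _; simp [PySem.Set.contains, hk, h1, h2, beq_eq_decide]),
          ← popKey_eq_filter _ _ hN3q]
        simp [Function.comp, h1, h2]
      · rw [List.filter_eq_self.mpr (by intro r _; simp [PySem.Set.contains, h1, h2])]
        simp [Function.comp, h1, h2]
  · rw [if_neg hk]
    unfold pruneL2 pruneL3
    rw [List.filter_eq_self.mpr (by intro q _; simp [PySem.Set.contains])]
    have : ∀ q ∈ p.2, ((q.1 : String),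
        q.2.filter (fun r => !(PySem.Set.contains
          [["result", "lease", "fee_breakdown"],
           ["result", "acquisition", "safety_margin_applied"]] ([p.1] ++ [q.1] ++ [r.1])))) = q := by
      intro q _
      rw [List.filter_eq_self.mpr (by intro r _; simp [PySem.Set.contains, hk])]
    rw [List.map_congr_left this]
    simp

theorem end_user_case (d : List (String × List (String × List (String × String))))
    (hPre : Pre_filter_response_fields d "simulations" []) :
    removePath (removePath (removePath d ["result", "lease", "fee_breakdown"])
        ["result", "acquisition", "safety_margin_applied"]) ["result", "residual"]
      = pruneL1 [["result", "lease", "fee_breakdown"],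
                 ["result", "acquisition", "safety_margin_applied"],
                 ["result", "residual"]] d := by
  obtain ⟨hTop, hInner⟩ := hPre
  show updateFirst (updateFirst (updateFirst d "result"
      (fun v => updateFirst v "lease" (fun w => popKey w "fee_breakdown"))) "result"
      (fun v => updateFirst v "acquisition" (fun w => popKey w "safety_margin_applied"))) "result"
      (fun v => popKey v "residual")
    = _
  rw [updateFirst_updateFirst, updateFirst_updateFirst, updateFirst_eq_map _ _ _ hTop]
  unfold pruneL1
  rw [List.filter_eq_self.mpr (by intro p _; simp [PySem.Set.contains])]
  apply List.map_congr_left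
  intro p hp
  obtain ⟨hN2, hN3⟩ := hInner p hp
  by_cases hk : p.1 = "result"
  · rw [if_pos hk]
    congr 1
    have hN2' : NodupKeys (p.2.map
        (fun q => if q.1 = "lease" then (q.1, popKey q.2 "fee_breakdown") else q)) :=
      nodup_map_update _ _ _ hN2
    have hN2'' : NodupKeys ((p.2.map
        (fun q => if q.1 = "lease" then (q.1, popKey q.2 "fee_breakdown") else q)).map
        (fun q => if q.1 = "acquisition" then (q.1, popKey q.2 "safety_margin_applied") else q)) :=
      nodup_map_update _ _ _ hN2'
    rw [updateFirst_eq_map _ _ _ hN2, updateFirst_eq_map _ _ _ hN2',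
        popKey_eq_filter _ _ hN2'', List.map_map, List.filter_map]
    unfold pruneL2
    rw [List.filter_congr (l := p.2)
      (q := fun q => !(PySem.Set.contains
        [["result", "lease", "fee_breakdown"],
         ["result", "acquisition", "safety_margin_applied"],
         ["result", "residual"]] ([p.1] ++ [q.1])))
      (by
        intro q _
        by_cases h1 : q.1 = "lease" <;> by_cases h2 : q.1 = "acquisition" <;>
          simp [Function.comp, PySem.Set.contains, hk, h1, h2, beq_eq_decide])]
    apply List.map_congr_left
    intro q hq'
    have hq : q ∈ p.2 := List.mem_of_mem_filter hq'
    have hN3q := hN3 q hq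
    unfold pruneL3
    by_cases h1 : q.1 = "lease"
    · rw [List.filter_congr (l := q.2)
        (q := fun r => !(r.1 == "fee_breakdown"))
        (by intro r _; simp [PySem.Set.contains, hk, h1, beq_eq_decide]),
        ← popKey_eq_filter _ _ hN3q]
      simp [Function.comp, h1]
    · by_cases h2 : q.1 = "acquisition"
      · rw [List.filter_congr (l := q.2)
          (q := fun r => !(r.1 == "safety_margin_applied"))
          (by intro r _; simp [PySem.Set.contains, hk, h1, h2, beq_eq_decide]),
          ← popKey_eq_filter _ _ hN3q]
        simp [Function.comp, h1, h2]
      · rw [List.filter_eq_self.mpr (by intro r _; simp [PySem.Set.contains, h1, h2])]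
        simp [Function.comp, h1, h2]
  · rw [if_neg hk]
    unfold pruneL2 pruneL3
    rw [List.filter_eq_self.mpr (by intro q _; simp [PySem.Set.contains, hk])]
    have : ∀ q ∈ p.2, ((q.1 : String),
        q.2.filter (fun r => !(PySem.Set.contains
          [["result", "lease", "fee_breakdown"],
           ["result", "acquisition", "safety_margin_applied"],
           ["result", "residual"]] ([p.1] ++ [q.1] ++ [r.1])))) = q := by
      intro q _
      rw [List.filter_eq_self.mpr (by intro r _; simp [PySem.Set.contains, hk])]
    rw [List.map_congr_left this]
    simp

-- ===== VERDICT (by name: the statement is the Claim_ definition above) =====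
theorem filter_response_fields_spec : Claim_equal_filter_response_fields := by
  intro data resource user _hDom hPre
  unfold Spec_filter_response_fields filter_response_fields filter_response_fields_alt
  by_cases hr : resource = "simulations"
  · by_cases h1 : get_user_role_port user = "investor"
    · have hPre' : Pre_filter_response_fields data "simulations" [] := hPre
      simpa [pyHiddenFields, hr, h1, pySplitDot, List.foldl] using investor_case data hPre'
    · by_cases h2 : get_user_role_port user = "end_user"
      · have hPre' : Pre_filter_response_fields data "simulations" [] := hPre
        simpa [pyHiddenFields, hr, h1, h2, pySplitDot, List.foldl] using end_user_case data hPre'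
      · simp [pyHiddenFields, hr, h1, h2]
  · simp [pyHiddenFields, hr]
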